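-- pv_equiv track=rewrite | github.com/koohack/algorithm | num_14889.py | getHap
-- ===== SOURCE A (Python) =====
-- def getHap(check, m):
--     first=[]
--     second=[]
--
--     for i, item in enumerate(check):
--         if item:
--             first.append(i)
--         else:
--             second.append(i)
--     hap1=0
--     for i in range(len(first)):
--         for j in range(i+1, len(first)):
--             hap1+=m[first[i]][first[j]]
--             hap1+=m[first[j]][first[i]]
--     hap2=0
--     for i in range(len(second)):
--         for j in range(i+1, len(second)):
--             hap2+=m[second[i]][second[j]]
--             hap2+=m[second[j]][second[i]]
--     if hap1 > hap2:
--         return hap1-hap2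
--     else:
--         return hap2-hap1
-- ===== SOURCE B (Python) =====
-- def getHap(check, m):
--     hap1 = 0
--     hap2 = 0
--     n = len(check)
--     for i in range(n):
--         for j in range(i + 1, n):
--             if check[i] and check[j]:
--                 hap1 += m[i][j] + m[j][i]
--             elif not check[i] and not check[j]:
--                 hap2 += m[i][j] + m[j][i]
--     return abs(hap1 - hap2)
-- ===== Notes on version B (the rewrite author's own statement) =====
-- stated objective: alternative
-- what changed: Replaces A's partition-into-first/second index lists followed by two separate pairwise index scans with a single pair-classifying scan over all index pairs i<j that accumulates both team sums at once and returns abs(hap1-hap2).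
import Mathlib
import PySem

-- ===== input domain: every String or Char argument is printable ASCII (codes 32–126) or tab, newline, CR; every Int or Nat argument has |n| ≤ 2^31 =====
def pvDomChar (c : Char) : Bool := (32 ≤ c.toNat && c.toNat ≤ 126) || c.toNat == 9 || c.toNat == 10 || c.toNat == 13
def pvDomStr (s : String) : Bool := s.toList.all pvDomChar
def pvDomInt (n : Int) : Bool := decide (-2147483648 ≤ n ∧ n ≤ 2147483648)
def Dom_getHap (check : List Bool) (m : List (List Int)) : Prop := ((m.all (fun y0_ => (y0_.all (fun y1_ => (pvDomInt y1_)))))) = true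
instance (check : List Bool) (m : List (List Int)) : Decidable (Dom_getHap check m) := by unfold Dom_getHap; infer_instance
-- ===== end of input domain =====

-- B replaces A's partition-into-two-index-lists plus two separate pairwise scans by a single
-- pair-classifying scan over all index pairs i<j (objective: alternative decomposition, same cost).


-- ===== PORT A =====
-- m[a][b] for Int indices; exact inside Pre_getHap (the IndexError inputs are excluded there)
def mAtA (m : List (List Int)) (a b : Int) : Int :=
  PySem.List.pyGetD (PySem.List.pyGetD m a []) b 0

def getHap (check : List Bool) (m : List (List Int)) : Int :=
  let fs := (PySem.List.enumerate check 0).foldl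
    (fun (p : List Int × List Int) iv =>
      if iv.2 then (p.1 ++ [iv.1], p.2) else (p.1, p.2 ++ [iv.1]))
    ([], [])
  let first := fs.1
  let second := fs.2
  let hap1 := (PySem.List.pyRange 0 (first.length : Int) 1).foldl
    (fun h i => (PySem.List.pyRange (i + 1) (first.length : Int) 1).foldl
      (fun h j =>
        h + mAtA m (PySem.List.pyGetD first i 0) (PySem.List.pyGetD first j 0)
          + mAtA m (PySem.List.pyGetD first j 0) (PySem.List.pyGetD first i 0))
      h)
    0
  let hap2 := (PySem.List.pyRange 0 (second.length : Int) 1).foldl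
    (fun h i => (PySem.List.pyRange (i + 1) (second.length : Int) 1).foldl
      (fun h j =>
        h + mAtA m (PySem.List.pyGetD second i 0) (PySem.List.pyGetD second j 0)
          + mAtA m (PySem.List.pyGetD second j 0) (PySem.List.pyGetD second i 0))
      h)
    0
  if hap1 > hap2 then hap1 - hap2 else hap2 - hap1

-- ===== PORT B =====
def getHap_alt (check : List Bool) (m : List (List Int)) : Int :=
  let n := check.length
  let hs := (PySem.List.pyRange 0 (n : Int) 1).foldl
    (fun (hs : Int × Int) i => (PySem.List.pyRange (i + 1) (n : Int) 1).foldl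
      (fun hs j =>
        if PySem.List.pyGetD check i false && PySem.List.pyGetD check j false then
          (hs.1 + (PySem.List.pyGetD (PySem.List.pyGetD m i []) j 0
                   + PySem.List.pyGetD (PySem.List.pyGetD m j []) i 0), hs.2)
        else if !PySem.List.pyGetD check i false && !PySem.List.pyGetD check j false then
          (hs.1, hs.2 + (PySem.List.pyGetD (PySem.List.pyGetD m i []) j 0
                   + PySem.List.pyGetD (PySem.List.pyGetD m j []) i 0))
        else hs)
      hs)
    (0, 0)
  |hs.1 - hs.2|

-- ===== PRECONDITION & SPEC =====
-- Pre_ excludes exactly the inputs on which A raises IndexError: some same-team pair of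
-- indices reaches an entry m[i][j] that does not exist.
def Pre_getHap (check : List Bool) (m : List (List Int)) : Prop :=
  ∀ i < check.length, ∀ j < check.length, i ≠ j →
    check.getD i false = check.getD j false →
    i < m.length ∧ j < (m.getD i []).length
instance (check : List Bool) (m : List (List Int)) : Decidable (Pre_getHap check m) := by
  unfold Pre_getHap; infer_instance

def pvWitness_getHap : List Bool × List (List Int) :=
  ([true, false, true], [[0, 1, 2], [3, 4, 5], [6, 7, 8]])

def Spec_getHap (check : List Bool) (m : List (List Int)) (out : Int) : Prop := out = getHap_alt check m
instance (check : List Bool) (m : List (List Int)) (out : Int) : Decidable (Spec_getHap check m out) := by unfold Spec_getHap; infer_instance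

-- ===== CLAIM (what is proved, stated in full; the proofs are below) =====
def Claim_equal_getHap : Prop := ∀ (check : List Bool) (m : List (List Int)), Dom_getHap check m → Pre_getHap check m → Spec_getHap check m (getHap check m)

-- ===== LEMMAS AND PROOFS =====

-- all unordered index pairs of a list, in the order a double loop "for i … for j>i …" visits them
def pairList {α : Type} : List α → List (α × α)
  | [] => []
  | a :: t => t.map (fun b => (a, b)) ++ pairList t

theorem pairFold {σ : Type} (f : Int → Int → σ → σ) (n : Nat) :
    ∀ (d k : Nat) (h0 : σ), n - k = d → k ≤ n →
    (PySem.List.pyRange (k : Int) (n : Int) 1).foldl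
      (fun h i => (PySem.List.pyRange (i + 1) (n : Int) 1).foldl (fun h j => f i j h) h) h0
    = (pairList (PySem.List.pyRange (k : Int) (n : Int) 1)).foldl (fun h p => f p.1 p.2 h) h0 := by
  intro d
  induction d with
  | zero =>
    intro k h0 hd hk
    have h1 : (n : Int) ≤ (k : Int) := by exact_mod_cast Nat.le_of_sub_eq_zero hd
    rw [PySem.List.pyRange_one_eq_nil h1]
    simp [pairList]
  | succ d ih =>
    intro k h0 hd hk
    have hkn : k < n := by omega
    have h1 : (k : Int) < (n : Int) := by exact_mod_cast hkn
    rw [PySem.List.pyRange_one_cons h1]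
    simp only [List.foldl_cons, pairList, List.foldl_append, List.foldl_map]
    have hc : ((k : Int) + 1) = ((k + 1 : Nat) : Int) := by push_cast; ring
    rw [hc]
    exact ih (k + 1) _ (by omega) (by omega)

theorem pairFold0 {σ : Type} (f : Int → Int → σ → σ) (n : Nat) (h0 : σ) :
    (PySem.List.pyRange 0 (n : Int) 1).foldl
      (fun h i => (PySem.List.pyRange (i + 1) (n : Int) 1).foldl (fun h j => f i j h) h) h0
    = (pairList (PySem.List.pyRange 0 (n : Int) 1)).foldl (fun h p => f p.1 p.2 h) h0 := by
  have := pairFold f n n 0 h0 (by omega) (Nat.zero_le n)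
  simpa using this

theorem pairList_map {α β : Type} (f : α → β) (L : List α) :
    pairList (L.map f) = (pairList L).map (fun p => (f p.1, f p.2)) := by
  induction L with
  | nil => simp [pairList]
  | cons a t ih => simp [pairList, ih, List.map_map]

theorem pairList_filter {α : Type} (c : α → Bool) (L : List α) :
    (pairList L).filter (fun p => c p.1 && c p.2) = pairList (L.filter c) := by
  induction L with
  | nil => simp [pairList]
  | cons a t ih =>
    simp only [pairList, List.filter_append, List.filter_map, Function.comp_def]
    by_cases ha : c a
    · simp [ha, pairList, ih]
    · simp [ha, ih]

theorem abs_eq_branch (x y : Int) : (if x > y then x - y else y - x) = |x - y| := by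
  by_cases h : x > y
  · rw [if_pos h, abs_of_pos (by omega)]
  · rw [if_neg h, abs_of_nonpos (by omega)]; ring

theorem hapA (g : Int → Int → Int) (xs : List Int) :
    (PySem.List.pyRange 0 (xs.length : Int) 1).foldl
      (fun h i => (PySem.List.pyRange (i + 1) (xs.length : Int) 1).foldl
        (fun h j => h + g (PySem.List.pyGetD xs i 0) (PySem.List.pyGetD xs j 0)
                      + g (PySem.List.pyGetD xs j 0) (PySem.List.pyGetD xs i 0)) h) 0
    = (pairList xs).foldl (fun h p => h + (g p.1 p.2 + g p.2 p.1)) 0 := by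
  have h1 : (PySem.List.pyRange 0 (xs.length : Int) 1).foldl
      (fun h i => (PySem.List.pyRange (i + 1) (xs.length : Int) 1).foldl
        (fun h j => h + g (PySem.List.pyGetD xs i 0) (PySem.List.pyGetD xs j 0)
                      + g (PySem.List.pyGetD xs j 0) (PySem.List.pyGetD xs i 0)) h) 0
      = (pairList (PySem.List.pyRange 0 (xs.length : Int) 1)).foldl
          (fun h p => h + g (PySem.List.pyGetD xs p.1 0) (PySem.List.pyGetD xs p.2 0)
                        + g (PySem.List.pyGetD xs p.2 0) (PySem.List.pyGetD xs p.1 0)) 0 :=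
    pairFold0 _ xs.length 0
  rw [h1]
  conv_rhs => rw [← PySem.List.map_pyGetD_pyRange_zero' xs 0]
  rw [pairList_map, List.foldl_map]
  apply PySem.List.foldl_congr_mem
  intro acc x _
  dsimp only
  ring

theorem hapB (c : Int → Bool) (g : Int → Int → Int) (n : Nat) :
    (PySem.List.pyRange 0 (n : Int) 1).foldl
      (fun (hs : Int × Int) i => (PySem.List.pyRange (i + 1) (n : Int) 1).foldl
        (fun hs j =>
          if c i && c j then (hs.1 + (g i j + g j i), hs.2)
          else if !c i && !c j then (hs.1, hs.2 + (g i j + g j i))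
          else hs) hs) (0, 0)
    = ((pairList ((PySem.List.pyRange 0 (n : Int) 1).filter c)).foldl
         (fun h p => h + (g p.1 p.2 + g p.2 p.1)) 0,
       (pairList ((PySem.List.pyRange 0 (n : Int) 1).filter (fun j => !c j))).foldl
         (fun h p => h + (g p.1 p.2 + g p.2 p.1)) 0) := by
  have h1 : (PySem.List.pyRange 0 (n : Int) 1).foldl
      (fun (hs : Int × Int) i => (PySem.List.pyRange (i + 1) (n : Int) 1).foldl
        (fun hs j =>
          if c i && c j then (hs.1 + (g i j + g j i), hs.2)
          else if !c i && !c j then (hs.1, hs.2 + (g i j + g j i))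
          else hs) hs) (0, 0)
      = (pairList (PySem.List.pyRange 0 (n : Int) 1)).foldl
          (fun hs p =>
            if c p.1 && c p.2 then (hs.1 + (g p.1 p.2 + g p.2 p.1), hs.2)
            else if !c p.1 && !c p.2 then (hs.1, hs.2 + (g p.1 p.2 + g p.2 p.1))
            else hs) (0, 0) :=
    pairFold0 _ n (0, 0)
  rw [h1]
  have hcong : ∀ (acc : Int × Int), ∀ p ∈ pairList (PySem.List.pyRange 0 (n : Int) 1),
      (if c p.1 && c p.2 then (acc.1 + (g p.1 p.2 + g p.2 p.1), acc.2)
       else if !c p.1 && !c p.2 then (acc.1, acc.2 + (g p.1 p.2 + g p.2 p.1))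
       else acc)
      = ((if c p.1 && c p.2 then acc.1 + (g p.1 p.2 + g p.2 p.1) else acc.1),
         (if !c p.1 && !c p.2 then acc.2 + (g p.1 p.2 + g p.2 p.1) else acc.2)) := by
    intro acc p _
    cases hc1 : c p.1 <;> cases hc2 : c p.2 <;> simp
  rw [PySem.List.foldl_congr_mem _ _ _ _ hcong]
  rw [PySem.List.foldl_prod_mk
        (fun (s : Int) (p : Int × Int) => if c p.1 && c p.2 then s + (g p.1 p.2 + g p.2 p.1) else s)
        (fun (s : Int) (p : Int × Int) => if !c p.1 && !c p.2 then s + (g p.1 p.2 + g p.2 p.1) else s)]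
  rw [PySem.List.foldl_if_eq_foldl_filter (fun p : Int × Int => c p.1 && c p.2)
        (fun (s : Int) p => s + (g p.1 p.2 + g p.2 p.1)),
      PySem.List.foldl_if_eq_foldl_filter (fun p : Int × Int => !c p.1 && !c p.2)
        (fun (s : Int) p => s + (g p.1 p.2 + g p.2 p.1))]
  rw [pairList_filter c, pairList_filter (fun j => !c j)]

-- ===== VERDICT (by name: the statement is the Claim_ definition above) =====
theorem getHap_spec : Claim_equal_getHap := by
  intro check m _ _
  simp only [Spec_getHap, getHap, getHap_alt]
  have e1 : (PySem.List.enumerate check 0).foldl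
      (fun (p : List Int × List Int) iv =>
        if iv.2 then (p.1 ++ [iv.1], p.2) else (p.1, p.2 ++ [iv.1])) ([], [])
      = ((PySem.List.pyRange 0 (check.length : Int) 1).filter
           (fun j => PySem.List.pyGetD check j false),
         (PySem.List.pyRange 0 (check.length : Int) 1).filter
           (fun j => !PySem.List.pyGetD check j false)) := by
    have hc : ∀ (acc : List Int × List Int), ∀ x ∈ PySem.List.enumerate check 0,
        (if x.2 then (acc.1 ++ [x.1], acc.2) else (acc.1, acc.2 ++ [x.1]))
        = ((if x.2 then acc.1 ++ [x.1] else acc.1), (if x.2 then acc.2 else acc.2 ++ [x.1])) := by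
      intro acc x _; cases h2 : x.2 <;> simp
    rw [PySem.List.foldl_congr_mem _ _ _ _ hc]
    rw [PySem.List.foldl_prod_mk (fun (s : List Int) (e : Int × Bool) => if e.2 then s ++ [e.1] else s)
          (fun (s : List Int) (e : Int × Bool) => if e.2 then s else s ++ [e.1])]
    have hc2 : ∀ (acc : List Int), ∀ x ∈ PySem.List.enumerate check 0,
        (if x.2 then acc else acc ++ [x.1]) = (if !x.2 then acc ++ [x.1] else acc) := by
      intro acc x _; cases h2 : x.2 <;> simp
    rw [PySem.List.foldl_congr_mem _ _ _ _ hc2]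
    rw [PySem.List.foldl_append_if (fun e : Int × Bool => e.2) (fun e : Int × Bool => e.1),
        PySem.List.foldl_append_if (fun e : Int × Bool => !e.2) (fun e : Int × Bool => e.1)]
    rw [PySem.List.enumerate_eq_map_pyRange check false]
    simp [List.filter_map, List.map_map, Function.comp_def, PySem.List.len_eq]
  rw [e1]
  dsimp only
  rw [hapA (mAtA m) ((PySem.List.pyRange 0 (check.length : Int) 1).filter
        (fun j => PySem.List.pyGetD check j false)),
      hapA (mAtA m) ((PySem.List.pyRange 0 (check.length : Int) 1).filter
        (fun j => !PySem.List.pyGetD check j false))]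
  have eB : (PySem.List.pyRange 0 (check.length : Int) 1).foldl
      (fun (hs : Int × Int) i => (PySem.List.pyRange (i + 1) (check.length : Int) 1).foldl
        (fun hs j =>
          if PySem.List.pyGetD check i false && PySem.List.pyGetD check j false then
            (hs.1 + (PySem.List.pyGetD (PySem.List.pyGetD m i []) j 0
                     + PySem.List.pyGetD (PySem.List.pyGetD m j []) i 0), hs.2)
          else if !PySem.List.pyGetD check i false && !PySem.List.pyGetD check j false then
            (hs.1, hs.2 + (PySem.List.pyGetD (PySem.List.pyGetD m i []) j 0
                     + PySem.List.pyGetD (PySem.List.pyGetD m j []) i 0))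
          else hs) hs) (0, 0)
      = ((pairList ((PySem.List.pyRange 0 (check.length : Int) 1).filter
             (fun j => PySem.List.pyGetD check j false))).foldl
           (fun h p => h + (mAtA m p.1 p.2 + mAtA m p.2 p.1)) 0,
         (pairList ((PySem.List.pyRange 0 (check.length : Int) 1).filter
             (fun j => !PySem.List.pyGetD check j false))).foldl
           (fun h p => h + (mAtA m p.1 p.2 + mAtA m p.2 p.1)) 0) :=
    hapB (fun j => PySem.List.pyGetD check j false) (mAtA m) check.length
  rw [eB]
  dsimp only
  exact abs_eq_branch _ _
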